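-- pv_equiv track=rewrite | github.com/Zxun2/cumulative-code-editor | test.py | possiblesums
-- ===== SOURCE A (Python) =====
-- def possiblesums(xs):
--   length = len(xs)
--   if (length <= 1):
--     return xs
--   else:
--     li = list(map(lambda x: x + xs[0], possiblesums(xs[1:])))
--     li.append(xs[0])
--     return li
-- ===== SOURCE B (Python) =====
-- def possiblesums(xs):
--     out = []
--     s = 0
--     for x in xs:
--         s += x
--         out.append(s)
--     out.reverse()
--     return out
-- ===== Notes on version B (the rewrite author's own statement) =====
-- stated objective: faster
-- what changed: Replaces the O(n^2) recursion (which re-adds the head to every element of the recursive result) with a single running-sum pass building the prefix sums and reversing once.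
import Mathlib
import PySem

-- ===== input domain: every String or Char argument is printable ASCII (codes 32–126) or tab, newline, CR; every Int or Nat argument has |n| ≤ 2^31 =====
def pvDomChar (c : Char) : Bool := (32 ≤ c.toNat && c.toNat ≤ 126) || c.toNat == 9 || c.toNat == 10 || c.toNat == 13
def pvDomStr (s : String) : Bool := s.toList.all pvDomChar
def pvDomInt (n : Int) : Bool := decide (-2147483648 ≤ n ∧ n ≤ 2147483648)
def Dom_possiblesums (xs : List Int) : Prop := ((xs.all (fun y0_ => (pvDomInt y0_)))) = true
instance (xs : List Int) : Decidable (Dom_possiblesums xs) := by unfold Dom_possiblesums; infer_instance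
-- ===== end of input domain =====

-- ===== PORT A =====
-- B replaces A's O(n^2) recursion with a single running-sum pass (asymptotically faster).
def possiblesums (xs : List Int) : List Int :=
  match xs with
  | [] => xs
  | [_] => xs
  | x :: y :: rest => ((possiblesums (y :: rest)).map (fun z => z + x)) ++ [x]

-- ===== PORT B =====
def possiblesumsLoop (xs : List Int) (s : Int) (out : List Int) : List Int :=
  match xs with
  | [] => out.reverse
  | x :: t => possiblesumsLoop t (s + x) (out ++ [s + x])

def possiblesums_alt (xs : List Int) : List Int := possiblesumsLoop xs 0 []

-- ===== PRECONDITION & SPEC =====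
def Spec_possiblesums (xs : List Int) (out : List Int) : Prop := out = possiblesums_alt xs
instance (xs : List Int) (out : List Int) : Decidable (Spec_possiblesums xs out) := by unfold Spec_possiblesums; infer_instance

-- ===== CLAIM (what is proved, stated in full; the proofs are below) =====
def Claim_equal_possiblesums : Prop := ∀ (xs : List Int), Dom_possiblesums xs → Spec_possiblesums xs (possiblesums xs)

-- ===== LEMMAS AND PROOFS =====

/-- prefix sums starting from accumulator `s`, in increasing-length order -/
def prefSums (xs : List Int) (s : Int) : List Int :=
  match xs with
  | [] => []
  | x :: t => (s + x) :: prefSums t (s + x)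

theorem possiblesumsLoop_eq (xs : List Int) (s : Int) (out : List Int) :
    possiblesumsLoop xs s out = (prefSums xs s).reverse ++ out.reverse := by
  induction xs generalizing s out with
  | nil => simp [possiblesumsLoop, prefSums]
  | cons x t ih => simp [possiblesumsLoop, prefSums, ih]

theorem map_prefSums (xs : List Int) (s a : Int) :
    (prefSums xs s).map (fun z => z + a) = prefSums xs (s + a) := by
  induction xs generalizing s with
  | nil => simp [prefSums]
  | cons x t ih =>
    simp only [prefSums, List.map_cons, ih]
    have h : s + x + a = s + a + x := by ring
    rw [h]

theorem possiblesums_eq_pref (xs : List Int) :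
    possiblesums xs = (prefSums xs 0).reverse := by
  induction xs with
  | nil => simp [possiblesums, prefSums]
  | cons x t ih =>
    cases t with
    | nil => simp [possiblesums, prefSums]
    | cons y rest =>
      simp only [possiblesums, ih, List.map_reverse, map_prefSums, zero_add]
      have : prefSums (x :: y :: rest) 0 = x :: prefSums (y :: rest) x := by
        simp [prefSums]
      rw [this]
      simp

-- ===== VERDICT (by name: the statement is the Claim_ definition above) =====
theorem possiblesums_spec : Claim_equal_possiblesums := by
  intro xs _
  unfold Spec_possiblesums possiblesums_alt
  rw [possiblesumsLoop_eq, possiblesums_eq_pref]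
  simp
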